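-- pv_equiv track=rewrite | github.com/AlecGrover/Commandline-Sweeper | dpll.py | getPure
-- ===== SOURCE A (Python) =====
-- def getPure(instance):
--     pcand, pures= set(), set()
--
--     # Add pure candidates to pcand
--     for clause in instance:
--         for literal in clause:
--             if literal not in pcand:
--                 pcand.add(literal)
--
--     # Check lits in pcadn and ensure they are pure (if 'x' then '-x' not in list, vise versa)
--     for lit in pcand:
--         if lit not in pures and -lit not in pcand:
--             pures.add(lit)
--
--     return pures
-- ===== SOURCE B (Python) =====
-- def getPure(instance):
--     # One pass over all literals keyed by variable (absolute value), recording
--     # which polarity has been seen: 1 = only positive, 2 = only negative,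
--     # 3 = both (a literal 0 counts as both, being its own negation).
--     signs = {}
--     for clause in instance:
--         for lit in clause:
--             m = 1 if lit > 0 else 2 if lit < 0 else 3
--             v = abs(lit)
--             signs[v] = m if signs.get(v, m) == m else 3
--     return {v if m == 1 else -v for v, m in signs.items() if m != 3}
-- ===== Notes on version B (the rewrite author's own statement) =====
-- stated objective: alternative
-- what changed: Instead of A's set of all literals plus a per-literal check whether the negation is in that set, B makes one pass keeping a dict keyed by the variable (absolute value) whose value records which polarities were seen (1/2/3), and emits the signed literal for each single-polarity variable.
import Mathlib
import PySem

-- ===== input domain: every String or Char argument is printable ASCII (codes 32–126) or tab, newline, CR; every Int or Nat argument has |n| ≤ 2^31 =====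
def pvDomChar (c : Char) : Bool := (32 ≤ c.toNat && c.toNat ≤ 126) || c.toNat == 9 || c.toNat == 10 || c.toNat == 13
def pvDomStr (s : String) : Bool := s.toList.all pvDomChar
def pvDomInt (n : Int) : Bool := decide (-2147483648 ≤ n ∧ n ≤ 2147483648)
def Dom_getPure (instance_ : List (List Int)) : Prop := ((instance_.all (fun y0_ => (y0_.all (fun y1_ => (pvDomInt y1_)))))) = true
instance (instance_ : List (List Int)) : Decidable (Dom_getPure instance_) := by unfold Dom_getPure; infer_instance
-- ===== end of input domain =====

-- B replaces A's literal-set + negation-membership check by a single pass keyed by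
-- VARIABLE (absolute value) recording which polarities were seen (alternative; same cost).
-- Both Pythons return a set (compared as a finite set).

-- ===== PORT A =====
def getPure (instance_ : List (List Int)) : List Int :=
  -- pcand: for clause in instance: for literal in clause: if literal not in pcand: pcand.add(literal)
  let pcand : PySem.Set Int :=
    instance_.foldl
      (fun pc clause =>
        clause.foldl
          (fun pc lit => if PySem.Set.contains pc lit then pc else PySem.Set.add pc lit)
          pc)
      PySem.Set.empty
  -- pures: for lit in pcand: if lit not in pures and -lit not in pcand: pures.add(lit)
  let pures : PySem.Set Int :=
    pcand.foldl
      (fun pu lit =>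
        if !PySem.Set.contains pu lit && !PySem.Set.contains pcand (-lit) then
          PySem.Set.add pu lit
        else pu)
      PySem.Set.empty
  pures

-- ===== PORT B =====
-- the loop body of Source B: signs[v] = m if signs.get(v, m) == m else 3
def pvStepB (d : PySem.Dict Int Int) (lit : Int) : PySem.Dict Int Int :=
  let m : Int := if lit > 0 then 1 else if lit < 0 then 2 else 3
  let v : Int := |lit|
  d.insert v (if d.getD v m == m then m else 3)

def getPure_alt (instance_ : List (List Int)) : List Int :=
  let signs : PySem.Dict Int Int :=
    instance_.foldl (fun d clause => clause.foldl pvStepB d) PySem.Dict.empty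
  PySem.Set.ofList
    ((signs.items.filter (fun p => p.2 != 3)).map (fun p => if p.2 == 1 then p.1 else -p.1))

-- ===== PRECONDITION & SPEC =====
def Spec_getPure (instance_ : List (List Int)) (out : List Int) : Prop := out = getPure_alt instance_
instance (instance_ : List (List Int)) (out : List Int) : Decidable (Spec_getPure instance_ out) := by unfold Spec_getPure; infer_instance

-- ===== CLAIM (what is proved, stated in full; the proofs are below) =====
def Claim_equal_getPure : Prop := ∀ (instance_ : List (List Int)), Dom_getPure instance_ → Spec_getPure instance_ (getPure instance_)

-- ===== LEMMAS AND PROOFS =====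

-- polarity record of variable v over the whole literal list F (1 pos only, 2 neg only, 3 both/zero)
def pvSigma (v : Int) (F : List Int) : Int :=
  if v = 0 ∨ (v ∈ F ∧ -v ∈ F) then 3 else if v ∈ F then 1 else 2

-- A's guarded insert is exactly Set.add
theorem pv_guarded_add (pc : PySem.Set Int) (lit : Int) :
    (if PySem.Set.contains pc lit then pc else PySem.Set.add pc lit) = PySem.Set.add pc lit := by
  split_ifs with h
  · rw [PySem.Set.add_of_mem (by simpa [PySem.Set.contains, List.contains_eq_mem] using h)]
  · rfl

-- A's pcand loop builds set(flatten(instance_))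
theorem pv_pcand_eq (instance_ : List (List Int)) :
    instance_.foldl
      (fun pc clause =>
        clause.foldl
          (fun pc lit => if PySem.Set.contains pc lit then pc else PySem.Set.add pc lit)
          pc)
      PySem.Set.empty
    = PySem.Set.ofList instance_.flatten := by
  simp only [pv_guarded_add]
  rw [PySem.Set.ofList, List.foldl_flatten]

-- A's pures loop over a duplicate-free list is a filter (the `lit not in pures` test never fires)
theorem pv_pures_fold (pred : Int → Bool) :
    ∀ (xs acc : List Int), xs.Nodup → (∀ x ∈ xs, x ∉ acc) →
    xs.foldl
      (fun pu lit => if !PySem.Set.contains pu lit && pred lit then PySem.Set.add pu lit else pu)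
      acc
    = acc ++ xs.filter pred := by
  intro xs
  induction xs with
  | nil => simp
  | cons x t ih =>
    intro acc hnd hdis
    have hxacc : x ∉ acc := hdis x (by simp)
    have hc : PySem.Set.contains acc x = false := by
      simp only [PySem.Set.contains, List.contains_eq_mem, decide_eq_false_iff_not]
      exact hxacc
    simp only [List.foldl_cons, hc, Bool.not_false, Bool.true_and]
    by_cases hp : pred x
    · rw [if_pos hp, PySem.Set.add_of_not_mem hxacc,
        ih (acc ++ [x]) hnd.of_cons
          (by
            intro y hy
            simp only [List.mem_append, List.mem_singleton]
            rintro (h | rfl)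
            · exact hdis y (by simp [hy]) h
            · exact (List.nodup_cons.mp hnd).1 hy)]
      simp [hp]
    · rw [if_neg (by simp [hp]),
        ih acc hnd.of_cons (fun y hy => hdis y (by simp [hy]))]
      simp [hp]

-- pvSigma of an untouched variable is unchanged by appending one literal
theorem pv_sigma_untouched (w l : Int) (F : List Int) (hw : 0 ≤ w) (hne : w ≠ |l|) :
    pvSigma w (F ++ [l]) = pvSigma w F := by
  have h1 : w ∈ F ++ [l] ↔ w ∈ F := by
    simp only [List.mem_append, List.mem_singleton]
    constructor
    · rintro (h | rfl)
      · exact h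
      · exact absurd (abs_of_nonneg hw).symm hne
    · exact Or.inl
  have h2 : -w ∈ F ++ [l] ↔ -w ∈ F := by
    simp only [List.mem_append, List.mem_singleton]
    constructor
    · rintro (h | h)
      · exact h
      · exfalso; apply hne; rw [← h, abs_neg, abs_of_nonneg hw]
    · exact Or.inl
  simp only [pvSigma, h1, h2]

-- appending a literal l updates pvSigma at |l| exactly as Source B's loop body does (variable already seen)
theorem pv_sigma_self_mem (l : Int) (F : List Int) (h : l ∈ F ∨ -l ∈ F) :
    pvSigma |l| (F ++ [l])
      = (if pvSigma |l| F == (if l > 0 then (1:Int) else if l < 0 then 2 else 3)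
          then (if l > 0 then (1:Int) else if l < 0 then 2 else 3) else 3) := by
  have hne : (-l) ≠ l ∨ l = 0 := by omega
  rcases lt_trichotomy l 0 with hl | hl | hl
  · have hne' : (-l) ≠ l := by omega
    rw [abs_of_neg hl]
    by_cases h1 : -l ∈ F <;> by_cases h2 : l ∈ F <;>
      simp [pvSigma, List.mem_append, h1, h2, hl, hl.ne, hne',
        (by omega : ¬ (0:Int) < l), (by omega : l ≤ 0)] <;> tauto
  · subst hl
    simp [pvSigma]
  · have hne' : (-l) ≠ l := by omega
    rw [abs_of_pos hl]
    by_cases h1 : l ∈ F <;> by_cases h2 : -l ∈ F <;>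
      simp [pvSigma, List.mem_append, h1, h2, hl, hl.ne', hne',
        (by omega : (0:Int) < l), (by omega : ¬ l ≤ 0)] <;> tauto

-- appending a literal whose variable is new: pvSigma is the literal's own polarity mark
theorem pv_sigma_self_new (l : Int) (F : List Int) (h : |l| ∉ F.map (fun x => |x|)) :
    pvSigma |l| (F ++ [l]) = (if l > 0 then (1:Int) else if l < 0 then 2 else 3) := by
  have h1 : l ∉ F := fun hl => h (List.mem_map.mpr ⟨l, hl, rfl⟩)
  have h2 : -l ∉ F := fun hl => h (List.mem_map.mpr ⟨-l, hl, by rw [abs_neg]⟩)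
  rcases lt_trichotomy l 0 with hl | hl | hl
  · have hne' : (-l) ≠ l := by omega
    rw [abs_of_neg hl]
    simp [pvSigma, List.mem_append, h1, h2, hl, hl.ne, hne',
      (by omega : ¬ (0:Int) < l), (by omega : l ≤ 0)]
  · subst hl
    simp [pvSigma]
  · have hne' : (-l) ≠ l := by omega
    rw [abs_of_pos hl]
    simp [pvSigma, List.mem_append, h1, h2, hl, hl.ne', hne',
      (by omega : (0:Int) < l), (by omega : ¬ l ≤ 0)]

-- B's dict after the fold: items = abs-dedup of F paired with pvSigma
theorem pv_items_eq (F : List Int) :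
    (F.foldl pvStepB PySem.Dict.empty).items
      = (PySem.Set.ofList (F.map (fun l => |l|))).map (fun v => (v, pvSigma v F)) := by
  induction F using List.reverseRecOn with
  | nil => rfl
  | append_singleton F l ih =>
    rw [List.foldl_append, List.foldl_cons, List.foldl_nil]
    rw [List.map_append, List.map_cons, List.map_nil, PySem.Set.ofList_append_singleton]
    have hkeys : (F.foldl pvStepB PySem.Dict.empty).keys
        = PySem.Set.ofList (F.map (fun l => |l|)) := by
      simp [PySem.Dict.keys, ih, List.map_map, Function.comp_def]
    have hnod : (F.foldl pvStepB PySem.Dict.empty).keys.Nodup := by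
      rw [hkeys]; exact PySem.Set.nodup_ofList _
    by_cases hmem : |l| ∈ PySem.Set.ofList (F.map (fun x => |x|))
    · have hmemF : l ∈ F ∨ -l ∈ F := by
        rcases List.mem_map.mp ((PySem.Set.mem_ofList _ _).mp hmem) with ⟨x, hx, hax⟩
        rcases abs_eq_abs.mp hax.symm with rfl | rfl
        · exact Or.inl hx
        · exact Or.inr (by simpa using hx)
      have hitem : (|l|, pvSigma |l| F) ∈ (F.foldl pvStepB PySem.Dict.empty).items := by
        rw [ih]; exact List.mem_map.mpr ⟨|l|, hmem, rfl⟩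
      have hcont : (F.foldl pvStepB PySem.Dict.empty).contains |l| = true := by
        rw [PySem.Dict.contains_iff_mem_keys, hkeys]; exact hmem
      have hstep : pvStepB (F.foldl pvStepB PySem.Dict.empty) l
            = (F.foldl pvStepB PySem.Dict.empty).insert |l| (pvSigma |l| (F ++ [l])) := by
        dsimp only [pvStepB]
        rw [PySem.Dict.getD_of_mem_items _ hitem hnod, pv_sigma_self_mem l F hmemF]
      rw [hstep]
      rw [PySem.Dict.items_insert_of_contains _ _ hcont, ih, PySem.Set.add_of_mem hmem,
        List.map_map]
      apply List.map_congr_left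
      intro v hv
      have hv0 : 0 ≤ v := by
        rcases List.mem_map.mp ((PySem.Set.mem_ofList _ _).mp hv) with ⟨x, _, rfl⟩
        exact abs_nonneg x
      by_cases hvl : v = |l|
      · subst hvl; simp
      · simp only [Function.comp_apply, beq_iff_eq, if_neg hvl,
          pv_sigma_untouched v l F hv0 hvl]
    · have hcont : (F.foldl pvStepB PySem.Dict.empty).contains |l| = false := by
        rw [← Bool.not_eq_true, PySem.Dict.contains_iff_mem_keys, hkeys]; exact hmem
      have hstep : pvStepB (F.foldl pvStepB PySem.Dict.empty) l
            = (F.foldl pvStepB PySem.Dict.empty).insert |l| (pvSigma |l| (F ++ [l])) := by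
        dsimp only [pvStepB]
        rw [PySem.Dict.getD_of_not_contains _ _ hcont,
          pv_sigma_self_new l F (fun hx => hmem ((PySem.Set.mem_ofList _ _).mpr hx))]
        simp
      rw [hstep]
      rw [PySem.Dict.items_insert_of_not_contains _ _ hcont, ih,
        PySem.Set.add_of_not_mem hmem, List.map_append, List.map_cons, List.map_nil]
      congr 1
      apply List.map_congr_left
      intro v hv
      have hv0 : 0 ≤ v := by
        rcases List.mem_map.mp ((PySem.Set.mem_ofList _ _).mp hv) with ⟨x, _, rfl⟩
        exact abs_nonneg x
      have hvl : v ≠ |l| := fun h => hmem (h ▸ hv)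
      rw [pv_sigma_untouched v l F hv0 hvl]

-- filter+map over the items list is a filterMap over the variables
theorem pv_fusion (F : List Int) (V : List Int) :
    (((V.map (fun v => (v, pvSigma v F))).filter (fun p => p.2 != 3)).map
        (fun p => if p.2 == 1 then p.1 else -p.1))
      = V.filterMap (fun v => if pvSigma v F == 3 then none
            else some (if pvSigma v F == 1 then v else -v)) := by
  induction V with
  | nil => rfl
  | cons v T ih =>
    by_cases h : pvSigma v F = 3 <;> simp [h] <;> simpa using ih

-- pushing a filterMap that preserves abs through an exclusion filter
theorem pv_commute (g : Int → Option Int) (w : Int) :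
    ∀ (X : List Int), (∀ v ∈ X, ∀ x, g v = some x → |x| = v) →
    (X.filter (fun v => v != w)).filterMap g
      = (X.filterMap g).filter (fun x => |x| != w) := by
  intro X
  induction X with
  | nil => intro _; rfl
  | cons v T ih =>
    intro hX
    have ht := ih (fun v hv => hX v (by simp [hv]))
    by_cases hvw : v = w
    · subst hvw
      have hf : List.filter (fun y => y != v) (v :: T) = List.filter (fun y => y != v) T := by
        simp
      rw [hf, List.filterMap_cons]
      cases hg : g v with
      | none => simpa using ht
      | some x =>
        have hax : |x| = v := hX v (by simp) x hg
        rw [ht, List.filter_cons]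
        simp [hax]
    · simp only [List.filter_cons, List.filterMap_cons]
      have hb : (v != w) = true := by simp [hvw]
      rw [if_pos hb]
      cases hg : g v with
      | none => simp [hg, ht]
      | some x =>
        have hax : |x| = v := hX v (by simp) x hg
        simp [hg, ht, hax, hvw]

-- Set.discard is a filter (definitional)
theorem pv_discard_eq (s : PySem.Set Int) (x : Int) :
    PySem.Set.discard s x = s.filter (fun y => y != x) := rfl

-- main order lemma: variables in first-occurrence order, mapped to their pure literal,
-- give exactly the pure literals in first-occurrence order
theorem pv_main (F : List Int) (p : Int → Bool) (g : Int → Option Int)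
    (Hg : ∀ l ∈ F, g |l| = if p l then some l else none)
    (Hp : ∀ l ∈ F, p l = true → -l ∉ F) :
    ∀ (G : List Int), (∀ x ∈ G, x ∈ F) →
      (PySem.Set.ofList (G.map (fun l => |l|))).filterMap g = (PySem.Set.ofList G).filter p := by
  intro G
  induction G with
  | nil => intro _; rfl
  | cons l T ih =>
    intro hG
    have hlF : l ∈ F := hG l (by simp)
    have hT : ∀ x ∈ T, x ∈ F := fun x hx => hG x (by simp [hx])
    have hX : ∀ v ∈ PySem.Set.ofList (T.map (fun l => |l|)), ∀ x, g v = some x → |x| = v := by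
      intro v hv x hgx
      rcases List.mem_map.mp ((PySem.Set.mem_ofList _ _).mp hv) with ⟨l', hl', rfl⟩
      have hg' := Hg l' (hT l' hl')
      rw [hgx] at hg'
      by_cases hp' : p l'
      · rw [if_pos hp'] at hg'
        rw [Option.some_inj.mp hg']
      · rw [if_neg hp'] at hg'
        exact absurd hg' (by simp)
    rw [List.map_cons, PySem.Set.ofList_cons, pv_discard_eq, List.filterMap_cons,
      PySem.Set.ofList_cons, pv_discard_eq, List.filter_cons,
      pv_commute g |l| _ hX, ih hT]
    have hcomb : ((PySem.Set.ofList T).filter p).filter (fun x => |x| != |l|)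
        = ((PySem.Set.ofList T).filter (fun y => y != l)).filter p := by
      rw [List.filter_filter, List.filter_filter]
      apply List.filter_congr
      intro x hx
      have hxF : x ∈ F := hT x ((PySem.Set.mem_ofList _ _).mp hx)
      by_cases hp : p x
      · simp only [hp, Bool.and_true, Bool.true_and]
        by_cases hxl : x = l
        · subst hxl; simp
        · have : ¬ |x| = |l| := by
            intro hax
            rcases abs_eq_abs.mp hax with h | h
            · exact hxl h
            · exact Hp x hxF hp (by rw [h, neg_neg]; exact hlF)
          rw [Bool.eq_iff_iff]
          simp [this, hxl]
      · simp [hp]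
    rw [hcomb, Hg l hlF]
    by_cases hp : p l
    · simp [hp]
    · simp [hp]

-- ===== VERDICT (by name: the statement is the Claim_ definition above) =====
theorem getPure_spec : Claim_equal_getPure := by
  intro instance_ _
  unfold Spec_getPure
  simp only [getPure, getPure_alt]
  rw [pv_pcand_eq]
  rw [pv_pures_fold (fun lit => !PySem.Set.contains (PySem.Set.ofList instance_.flatten) (-lit))
      _ PySem.Set.empty (PySem.Set.nodup_ofList _) (by intro x _ h; simp [PySem.Set.empty] at h)]
  rw [show instance_.foldl (fun d clause => clause.foldl pvStepB d) PySem.Dict.empty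
        = instance_.flatten.foldl pvStepB PySem.Dict.empty from List.foldl_flatten.symm]
  rw [pv_items_eq, pv_fusion]
  have Hp : ∀ l ∈ instance_.flatten,
      (fun lit => !PySem.Set.contains (PySem.Set.ofList instance_.flatten) (-lit)) l = true →
      -l ∉ instance_.flatten := by
    intro l _ h
    simpa [PySem.Set.contains, List.contains_eq_mem] using h
  have Hg : ∀ l ∈ instance_.flatten,
      (fun v => if pvSigma v instance_.flatten == 3 then none
          else some (if pvSigma v instance_.flatten == 1 then v else -v)) |l|
        = if (fun lit => !PySem.Set.contains (PySem.Set.ofList instance_.flatten) (-lit)) l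
            then some l else none := by
    intro l hl
    have hmem : ∀ y : Int, PySem.Set.contains (PySem.Set.ofList instance_.flatten) y
        = decide (y ∈ instance_.flatten) := by
      intro y
      simp [PySem.Set.contains, List.contains_eq_mem, PySem.Set.mem_ofList]
    simp only [hmem]
    by_cases hneg : -l ∈ instance_.flatten
    · have h3 : pvSigma |l| instance_.flatten = 3 := by
        rcases lt_trichotomy l 0 with h0 | h0 | h0
        · rw [abs_of_neg h0]
          simp only [pvSigma, neg_neg]
          rw [if_pos (Or.inr ⟨hneg, hl⟩)]
        · subst h0; simp [pvSigma]
        · rw [abs_of_pos h0]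
          simp only [pvSigma]
          rw [if_pos (Or.inr ⟨hl, hneg⟩)]
      rw [h3]
      simp [hneg]
    · rcases lt_trichotomy l 0 with h0 | h0 | h0
      · have h2 : pvSigma |l| instance_.flatten = 2 := by
          rw [abs_of_neg h0]
          simp only [pvSigma, neg_neg]
          rw [if_neg (fun hc => hc.elim (fun hz => by omega) (fun hc2 => hneg hc2.1)),
            if_neg hneg]
        rw [h2]
        simp [hneg, abs_of_neg h0]
      · exact absurd (by simpa [h0] using hl) (by simpa [h0] using hneg)
      · have h1 : pvSigma |l| instance_.flatten = 1 := by
          rw [abs_of_pos h0]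
          simp only [pvSigma]
          rw [if_neg (fun hc => hc.elim (fun hz => by omega) (fun hc2 => hneg hc2.2)),
            if_pos hl]
        rw [h1]
        simp [hneg, abs_of_pos h0]
  rw [pv_main instance_.flatten _ _ Hg Hp instance_.flatten (fun x hx => hx)]
  rw [PySem.Set.ofList_eq_self_of_nodup _ ((PySem.Set.nodup_ofList _).filter _)]
  simp [PySem.Set.empty]
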